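-- pv_equiv track=rewrite | github.com/kuchikaSrihari/AIComlianceCodeAgentDemo | .github/scripts/compliance_scanner.py | _calculate_rule_risk
-- ===== SOURCE A (Python) =====
-- from typing import List, Dict, Any, Optional
--
-- def _calculate_rule_risk(findings: List[Dict]) -> int:
--     """Calculate risk score from rule-based findings."""
--     score = 0
--     for f in findings:
--         if f["severity"] == "critical":
--             score += 3
--         elif f["severity"] == "high":
--             score += 2
--         elif f["severity"] == "medium":
--             score += 1
--     return min(10, score)
-- ===== SOURCE B (Python) =====
-- def _calculate_rule_risk(findings):
--     """Calculate risk score from rule-based findings (tally-then-combine)."""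
--     counts = {}
--     for f in findings:
--         s = f["severity"]
--         counts[s] = counts.get(s, 0) + 1
--     score = 3 * counts.get("critical", 0) + 2 * counts.get("high", 0) + counts.get("medium", 0)
--     return min(10, score)
-- ===== Notes on version B (the rewrite author's own statement) =====
-- stated objective: alternative
-- what changed: Replaces the per-element if/elif score accumulation with a single frequency tally of severities followed by one closed weighted combination 3*critical+2*high+medium, capped at 10.
import Mathlib
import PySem

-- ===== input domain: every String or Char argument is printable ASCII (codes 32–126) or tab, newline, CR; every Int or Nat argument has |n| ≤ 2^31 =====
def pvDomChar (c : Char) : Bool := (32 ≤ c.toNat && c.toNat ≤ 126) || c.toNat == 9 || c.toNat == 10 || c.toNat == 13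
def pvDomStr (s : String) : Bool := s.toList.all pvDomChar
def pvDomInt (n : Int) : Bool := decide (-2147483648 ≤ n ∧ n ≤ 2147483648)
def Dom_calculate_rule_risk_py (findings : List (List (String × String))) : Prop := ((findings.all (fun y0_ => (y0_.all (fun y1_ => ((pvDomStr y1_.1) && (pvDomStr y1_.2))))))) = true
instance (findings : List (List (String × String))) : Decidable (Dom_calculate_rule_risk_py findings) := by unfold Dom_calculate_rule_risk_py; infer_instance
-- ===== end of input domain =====

-- ===== PORT A =====
-- B tallies severities once and combines the tallies by a closed weighted formula instead of A's per-element if/elif accumulation (alternative decomposition, same cost).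
-- f["severity"] raises KeyError on a missing key; Pre_ excludes that, so getD with a junk default is exact on Pre_.
def pvSev (f : List (String × String)) : String := (PySem.Dict.mk f).getD "severity" ""

def calculate_rule_risk_py (findings : List (List (String × String))) : Int :=
  let score := findings.foldl (fun score f =>
    if pvSev f == "critical" then score + 3
    else if pvSev f == "high" then score + 2
    else if pvSev f == "medium" then score + 1
    else score) 0
  min 10 score

-- ===== PORT B =====
def calculate_rule_risk_py_alt (findings : List (List (String × String))) : Int :=
  let counts : PySem.Dict String Int :=
    findings.foldl (fun d f => d.modify (pvSev f) 0 (· + 1)) PySem.Dict.empty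
  let score := 3 * counts.getD "critical" 0 + 2 * counts.getD "high" 0 + counts.getD "medium" 0
  min 10 score

-- ===== PRECONDITION & SPEC =====
-- Pre_ excludes exactly the inputs on which A raises KeyError: a finding without a "severity" key.
def Pre_calculate_rule_risk_py (findings : List (List (String × String))) : Prop :=
  ∀ f ∈ findings, (PySem.Dict.mk f).contains "severity" = true
instance (findings : List (List (String × String))) : Decidable (Pre_calculate_rule_risk_py findings) := by unfold Pre_calculate_rule_risk_py; infer_instance
def pvWitness_calculate_rule_risk_py : (List (List (String × String))) := [[("severity", "high")], [("severity", "low")]]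

def Spec_calculate_rule_risk_py (findings : List (List (String × String))) (out : Int) : Prop := out = calculate_rule_risk_py_alt findings
instance (findings : List (List (String × String))) (out : Int) : Decidable (Spec_calculate_rule_risk_py findings out) := by unfold Spec_calculate_rule_risk_py; infer_instance

-- ===== CLAIM (what is proved, stated in full; the proofs are below) =====
def Claim_equal_calculate_rule_risk_py : Prop := ∀ (findings : List (List (String × String))), Dom_calculate_rule_risk_py findings → Pre_calculate_rule_risk_py findings → Spec_calculate_rule_risk_py findings (calculate_rule_risk_py findings)

-- ===== LEMMAS AND PROOFS =====
-- A's accumulated score is the closed weighted combination of severity counts.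
theorem pvScore_eq (findings : List (List (String × String))) (s : Int) :
    findings.foldl (fun score f =>
      if pvSev f == "critical" then score + 3
      else if pvSev f == "high" then score + 2
      else if pvSev f == "medium" then score + 1
      else score) s
    = s + 3 * ((findings.map pvSev).count "critical" : Int)
        + 2 * ((findings.map pvSev).count "high" : Int)
        + ((findings.map pvSev).count "medium" : Int) := by
  induction findings generalizing s with
  | nil => simp
  | cons f t ih =>
    simp only [List.foldl_cons, List.map_cons, ih]
    by_cases h1 : pvSev f = "critical"
    · simp [h1]; ring
    · by_cases h2 : pvSev f = "high"
      · simp [h2]; ring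
      · by_cases h3 : pvSev f = "medium"
        · simp [h3]; ring
        · simp [h1, h2, h3]

-- B's tally dictionary reads back exactly the counts of the mapped severity list.
theorem pvCounts_getD_aux (findings : List (List (String × String))) (v : String)
    (d : PySem.Dict String Int) :
    (findings.foldl (fun d f => d.modify (pvSev f) 0 (· + 1)) d).getD v 0
    = d.getD v 0 + ((findings.map pvSev).count v : Int) := by
  induction findings generalizing d with
  | nil => simp
  | cons f t ih =>
    simp only [List.foldl_cons, List.map_cons, ih, PySem.Dict.getD_modify, List.count_cons]
    by_cases h : v = pvSev f
    · simp [h]; ring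
    · simp [h, Ne.symm h]

theorem pvCounts_getD (findings : List (List (String × String))) (v : String) :
    (findings.foldl (fun d f => d.modify (pvSev f) 0 (· + 1)) PySem.Dict.empty).getD v 0
    = ((findings.map pvSev).count v : Int) := by
  simpa using pvCounts_getD_aux findings v PySem.Dict.empty

-- ===== VERDICT (by name: the statement is the Claim_ definition above) =====
theorem calculate_rule_risk_py_spec : Claim_equal_calculate_rule_risk_py := by
  intro findings _ _
  unfold Spec_calculate_rule_risk_py calculate_rule_risk_py calculate_rule_risk_py_alt
  simp only [pvScore_eq, pvCounts_getD]
  ring_nf
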